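-- pv_equiv track=rewrite | github.com/caseybarajas/ReceiptQuestSystem | tests/print_from_file.py | parse_quest_from_text
-- ===== SOURCE A (Python) =====
-- from typing import List, Tuple
--
-- def parse_quest_from_text(text: str) -> Tuple[str, str, List[str]]:
--     """Parse a simple text format into (title, description, objectives).
--
--     Supported formats:
--     - Structured headers (case-insensitive):
--       Title: <title>
--       Description:
--         <free text lines>
--       Objectives:
--         - do this
--         - do that
--
--     - Minimal fallback:
--       First non-empty line is title; rest is description; no objectives.
--     """
--     lines = [ln.rstrip("\r\n") for ln in text.splitlines()]
--     title = ""
--     description_lines: List[str] = []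
--     objectives: List[str] = []
--
--     section = None  # 'desc' or 'obj'
--     found_any_header = False
--
--     def is_header(s: str, name: str) -> bool:
--         s_strip = s.strip().lower()
--         return s_strip == f"{name.lower()}:" or s_strip.startswith(f"{name.lower()}: ")
--
--     i = 0
--     while i < len(lines):
--         line = lines[i]
--         if is_header(line, "Title"):
--             found_any_header = True
--             title = line.split(":", 1)[1].strip() if ":" in line else ""
--             section = None
--             i += 1
--             continue
--         if is_header(line, "Description"):
--             found_any_header = True
--             section = 'desc'
--             i += 1
--             continue
--         if is_header(line, "Objectives"):
--             found_any_header = True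
--             section = 'obj'
--             i += 1
--             continue
--
--         if section == 'desc':
--             description_lines.append(line)
--         elif section == 'obj':
--             s = line.strip()
--             if s.startswith("- "):
--                 objectives.append(s[2:].strip())
--             elif s.startswith("[ ] "):
--                 objectives.append(s[4:].strip())
--             elif s:
--                 # Treat any non-empty line in objectives as an item
--                 objectives.append(s)
--         i += 1
--
--     if not found_any_header:
--         # Minimal fallback: first non-empty line = title, rest description
--         non_empty = [ln for ln in lines if ln.strip()]
--         if non_empty:
--             title = non_empty[0].strip()
--             rest_started = False
--             for ln in lines:
--                 if not rest_started:
--                     if ln.strip() == title: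
--                         rest_started = True
--                         continue
--                 description_lines.append(ln)
--
--     description = "\n".join(description_lines).strip()
--     title = title.strip() or "Untitled Quest"
--     return title, description, objectives
-- ===== SOURCE B (Python) =====
-- from typing import List, Optional, Tuple
--
--
-- def _is_header(s: str, name: str) -> bool:
--     t = s.strip().lower()
--     return t == name + ":" or t.startswith(name + ": ")
--
--
-- def _format_objective(line: str) -> Optional[str]:
--     s = line.strip()
--     if s.startswith("- "):
--         return s[2:].strip()
--     if s.startswith("[ ] "):
--         return s[4:].strip()
--     if s:
--         return s
--     return None
--
--
-- def _fallback(lines: List[str]) -> Tuple[str, List[str]]: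
--     # first non-empty line is the title, every other line is description
--     if not lines:
--         return "", []
--     ln, rest = lines[0], lines[1:]
--     if ln.strip():
--         return ln.strip(), rest
--     t, d = _fallback(rest)
--     return t, [ln] + d
--
--
-- def parse_quest_from_text(text: str) -> Tuple[str, str, List[str]]:
--     # pass 1: partition the lines into buckets (last Title line wins, Title resets the section)
--     lines = [ln.rstrip("\r\n") for ln in text.splitlines()]
--     title_line = None
--     sec = None
--     desc_raw: List[str] = []
--     obj_raw: List[str] = []
--     for ln in lines:
--         if _is_header(ln, "title"):
--             title_line = ln
--             sec = None
--         elif _is_header(ln, "description"):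
--             sec = 'desc'
--         elif _is_header(ln, "objectives"):
--             sec = 'obj'
--         elif sec == 'desc':
--             desc_raw.append(ln)
--         elif sec == 'obj':
--             obj_raw.append(ln)
--     found = title_line is not None or any(
--         _is_header(l, "description") or _is_header(l, "objectives") for l in lines)
--     # pass 2: format the buckets
--     if found:
--         title = (title_line.split(":", 1)[1].strip()
--                  if title_line is not None and ":" in title_line else "")
--     else:
--         title, desc_raw = _fallback(lines)
--     objectives = [o for o in map(_format_objective, obj_raw) if o is not None]
--     description = "\n".join(desc_raw).strip()
--     return (title.strip() or "Untitled Quest"), description, objectives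
-- ===== Notes on version B (the rewrite author's own statement) =====
-- stated objective: alternative
-- what changed: Replaces A's single interleaved while-loop (which formats objectives and builds the title/description in-flight, plus a two-pass rest_started fallback) with a partition-then-format decomposition: one scan buckets raw lines and captures the last Title line, a separate any() scan detects headers, formatting of description/objectives happens in a second pass, and the no-header fallback directly removes the first non-empty line.
import Mathlib
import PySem

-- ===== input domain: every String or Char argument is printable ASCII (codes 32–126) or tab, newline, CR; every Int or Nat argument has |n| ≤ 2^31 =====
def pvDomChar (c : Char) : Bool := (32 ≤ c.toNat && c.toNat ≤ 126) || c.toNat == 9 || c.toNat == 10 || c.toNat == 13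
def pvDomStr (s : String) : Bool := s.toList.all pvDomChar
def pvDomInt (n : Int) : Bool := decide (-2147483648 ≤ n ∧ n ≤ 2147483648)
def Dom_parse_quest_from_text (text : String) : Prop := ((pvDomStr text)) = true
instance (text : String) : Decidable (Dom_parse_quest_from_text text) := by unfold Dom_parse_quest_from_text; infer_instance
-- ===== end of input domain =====

-- B replaces A's single interleaved while-loop by partition-then-format (one scan into buckets,
-- then separate formatting passes) and a direct first-nonempty-line fallback; objective: alternative, not faster.

-- ===== PORT A =====
-- shared line preprocessing: `[ln.rstrip("\r\n") for ln in text.splitlines()]`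
-- (rstrip("\r\n") ported by hand: drop '\r'/'\n' from the right — exact for this fixed chars set)
def pvRstripCRLF (cs : List Char) : List Char :=
  (cs.reverse.dropWhile (fun c => c == '\r' || c == '\n')).reverse

def pvMkLines (text : String) : List (List Char) :=
  (PySem.Chars.splitlines text.toList).map pvRstripCRLF

-- `line.split(":", 1)[1].strip() if ":" in line else ""`  (the guard makes the [1] total:
-- with ':' present split(":",1) has exactly two parts, so the [] default is never taken)
def pvExtractTitle (line : List Char) : List Char :=
  if PySem.Chars.isIn [':'] line then
    PySem.Chars.strip (PySem.List.pyGetD (PySem.Chars.splitOnMax line [':'] 1) 1 [])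
  else []

-- A's nested `is_header(s, name)` (name given capitalised, lowered inside as in the source)
def pvIsHeaderA (s name : List Char) : Bool :=
  let t := PySem.Chars.lower (PySem.Chars.strip s)
  t == PySem.Chars.lower name ++ [':'] ||
    PySem.Chars.startswith t (PySem.Chars.lower name ++ [':', ' '])

-- A's while-loop; section: none = None, some true = 'desc', some false = 'obj'
def pvALoop (lines : List (List Char)) (title : List Char) (descL objs : List (List Char))
    (sec : Option Bool) (found : Bool) :
    List Char × List (List Char) × List (List Char) × Option Bool × Bool :=
  match lines with
  | [] => (title, descL, objs, sec, found)
  | line :: rest =>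
    if pvIsHeaderA line "Title".toList then
      pvALoop rest (pvExtractTitle line) descL objs none true
    else if pvIsHeaderA line "Description".toList then
      pvALoop rest title descL objs (some true) true
    else if pvIsHeaderA line "Objectives".toList then
      pvALoop rest title descL objs (some false) true
    else match sec with
      | some true => pvALoop rest title (descL ++ [line]) objs sec found
      | some false =>
        let s := PySem.Chars.strip line
        if PySem.Chars.startswith s ['-', ' '] then
          pvALoop rest title descL (objs ++ [PySem.Chars.strip (PySem.List.slice s (some 2) none)]) sec found
        else if PySem.Chars.startswith s ['[', ' ', ']', ' '] then
          pvALoop rest title descL (objs ++ [PySem.Chars.strip (PySem.List.slice s (some 4) none)]) sec found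
        else if s ≠ [] then pvALoop rest title descL (objs ++ [s]) sec found
        else pvALoop rest title descL objs sec found
      | none => pvALoop rest title descL objs sec found

-- A's fallback for-loop with its rest_started flag
def pvAFallbackLoop (lines : List (List Char)) (title : List Char) (started : Bool) :
    List (List Char) :=
  match lines with
  | [] => []
  | ln :: rest =>
    if started = false then
      if PySem.Chars.strip ln == title then pvAFallbackLoop rest title true
      else ln :: pvAFallbackLoop rest title false
    else ln :: pvAFallbackLoop rest title started

def parse_quest_from_text (text : String) : String × String × List String :=
  let lines := pvMkLines text
  match pvALoop lines [] [] [] none false with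
  | (title, descL, objs, _sec, found) =>
    let td : List Char × List (List Char) :=
      if found = false then
        match lines.filter (fun ln => PySem.Chars.strip ln ≠ []) with
        | [] => (title, descL)
        | h :: _ => (PySem.Chars.strip h, descL ++ pvAFallbackLoop lines (PySem.Chars.strip h) false)
      else (title, descL)
    let description := PySem.Chars.strip (PySem.Chars.join ['\n'] td.2)
    let t := PySem.Chars.strip td.1
    (String.mk (if t = [] then "Untitled Quest".toList else t),
     String.mk description, objs.map String.mk)

-- ===== PORT B =====
-- B's `_is_header` (name already lowercase)
def pvIsHeaderB (s name : List Char) : Bool :=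
  let t := PySem.Chars.lower (PySem.Chars.strip s)
  t == name ++ [':'] || PySem.Chars.startswith t (name ++ [':', ' '])

-- B's `_format_objective`
def pvFmtObj (line : List Char) : Option (List Char) :=
  let s := PySem.Chars.strip line
  if PySem.Chars.startswith s ['-', ' '] then
    some (PySem.Chars.strip (PySem.List.slice s (some 2) none))
  else if PySem.Chars.startswith s ['[', ' ', ']', ' '] then
    some (PySem.Chars.strip (PySem.List.slice s (some 4) none))
  else if s ≠ [] then some s
  else none

-- B's `_fallback`
def pvBFallback (lines : List (List Char)) : List Char × List (List Char) :=
  match lines with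
  | [] => ([], [])
  | ln :: rest =>
    if PySem.Chars.strip ln ≠ [] then (PySem.Chars.strip ln, rest)
    else
      let r := pvBFallback rest
      (r.1, ln :: r.2)

-- B's pass 1: partition into buckets
def pvBScan (lines : List (List Char)) (tl : Option (List Char)) (sec : Option Bool)
    (dr orr : List (List Char)) :
    Option (List Char) × Option Bool × List (List Char) × List (List Char) :=
  match lines with
  | [] => (tl, sec, dr, orr)
  | ln :: rest =>
    if pvIsHeaderB ln "title".toList then pvBScan rest (some ln) none dr orr
    else if pvIsHeaderB ln "description".toList then pvBScan rest tl (some true) dr orr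
    else if pvIsHeaderB ln "objectives".toList then pvBScan rest tl (some false) dr orr
    else match sec with
      | some true => pvBScan rest tl sec (dr ++ [ln]) orr
      | some false => pvBScan rest tl sec dr (orr ++ [ln])
      | none => pvBScan rest tl sec dr orr

def parse_quest_from_text_alt (text : String) : String × String × List String :=
  let lines := pvMkLines text
  match pvBScan lines none none [] [] with
  | (tl, _sec, dr, orr) =>
    let found := tl.isSome ||
      lines.any (fun l => pvIsHeaderB l "description".toList || pvIsHeaderB l "objectives".toList)
    let td : List Char × List (List Char) :=
      if found then
        ((match tl with | some l => pvExtractTitle l | none => []), dr)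
      else pvBFallback lines
    let objectives := orr.filterMap pvFmtObj
    let description := PySem.Chars.strip (PySem.Chars.join ['\n'] td.2)
    let t := PySem.Chars.strip td.1
    (String.mk (if t = [] then "Untitled Quest".toList else t),
     String.mk description, objectives.map String.mk)

-- ===== PRECONDITION & SPEC =====
def Spec_parse_quest_from_text (text : String) (out : String × String × List String) : Prop := out = parse_quest_from_text_alt text
instance (text : String) (out : String × String × List String) : Decidable (Spec_parse_quest_from_text text out) := by unfold Spec_parse_quest_from_text; infer_instance

-- ===== CLAIM (what is proved, stated in full; the proofs are below) =====
def Claim_equal_parse_quest_from_text : Prop := ∀ (text : String), Dom_parse_quest_from_text text → Spec_parse_quest_from_text text (parse_quest_from_text text)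

-- ===== LEMMAS AND PROOFS =====

-- the two header predicates agree on the three names used
lemma headerA_title (l : List Char) : pvIsHeaderA l "Title".toList = pvIsHeaderB l "title".toList := by
  have h : PySem.Chars.lower ['T','i','t','l','e'] = ['t','i','t','l','e'] := by decide
  simp [pvIsHeaderA, pvIsHeaderB, h]

lemma headerA_desc (l : List Char) : pvIsHeaderA l "Description".toList = pvIsHeaderB l "description".toList := by
  have h : PySem.Chars.lower ['D','e','s','c','r','i','p','t','i','o','n'] = ['d','e','s','c','r','i','p','t','i','o','n'] := by decide
  simp [pvIsHeaderA, pvIsHeaderB, h]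

lemma headerA_obj (l : List Char) : pvIsHeaderA l "Objectives".toList = pvIsHeaderB l "objectives".toList := by
  have h : PySem.Chars.lower ['O','b','j','e','c','t','i','v','e','s'] = ['o','b','j','e','c','t','i','v','e','s'] := by decide
  simp [pvIsHeaderA, pvIsHeaderB, h]

-- any header at all (title, description or objectives)
def pvAnyHdr (l : List Char) : Bool :=
  pvIsHeaderB l "title".toList || pvIsHeaderB l "description".toList || pvIsHeaderB l "objectives".toList

-- title value seen through A's title accumulator
def pvTVal (tl : Option (List Char)) (t0 : List Char) : List Char :=
  match tl with | some l => pvExtractTitle l | none => t0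

-- pvBScan's accumulators are write-only: pulling them out
lemma bscan_acc : ∀ (lines : List (List Char)) tl sec dr orr,
    pvBScan lines tl sec dr orr =
      ((pvBScan lines tl sec [] []).1, (pvBScan lines tl sec [] []).2.1,
       dr ++ (pvBScan lines tl sec [] []).2.2.1, orr ++ (pvBScan lines tl sec [] []).2.2.2) := by
  intro lines
  induction lines with
  | nil => intro tl sec dr orr; simp [pvBScan]
  | cons ln rest ih =>
    intro tl sec dr orr
    simp only [pvBScan]
    split_ifs with h1 h2 h3
    · rw [ih]
    · rw [ih]
    · rw [ih]
    · rcases sec with _ | b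
      · dsimp only; rw [ih]
      · cases b
        · dsimp only
          rw [ih tl (some false) dr (orr ++ [ln]), ih tl (some false) [] ([] ++ [ln])]
          simp
        · dsimp only
          rw [ih tl (some true) (dr ++ [ln]) orr, ih tl (some true) ([] ++ [ln]) []]
          simp

-- the scanned title line is some iff a Title header occurs
lemma bscan_tl : ∀ (lines : List (List Char)) tl sec dr orr,
    (pvBScan lines tl sec dr orr).1.isSome =
      (tl.isSome || lines.any (fun l => pvIsHeaderB l "title".toList)) := by
  intro lines
  induction lines with
  | nil => intro tl sec dr orr; simp [pvBScan]
  | cons ln rest ih =>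
    intro tl sec dr orr
    simp only [pvBScan, List.any_cons]
    split_ifs with h1 h2 h3
    · rw [ih]; simp_all
    · rw [ih]; simp_all
    · rw [ih]; simp_all
    · rcases sec with _ | b
      · dsimp only; rw [ih]; simp_all
      · cases b <;> (dsimp only; rw [ih]; simp_all)

-- no header at all: the scan is inert
lemma bscan_inert : ∀ (lines : List (List Char)),
    lines.any pvAnyHdr = false → pvBScan lines none none [] [] = (none, none, [], []) := by
  intro lines
  induction lines with
  | nil => intro _; rfl
  | cons ln rest ih =>
    intro h
    simp only [List.any_cons, Bool.or_eq_false_iff] at h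
    obtain ⟨h1, h2⟩ := h
    simp only [pvAnyHdr, Bool.or_eq_false_iff] at h1
    simp only [pvBScan, h1.1.1, h1.1.2, h1.2, if_neg, Bool.false_eq_true, if_false]
    exact ih h2

-- the main loop correspondence
lemma loop_eq : ∀ (lines : List (List Char)) (tl0 : Option (List Char)) sec0 d0 o0 t0 f0,
    pvALoop lines (pvTVal tl0 t0) d0 o0 sec0 (f0 || tl0.isSome) =
      (pvTVal (pvBScan lines tl0 sec0 [] []).1 t0,
       d0 ++ (pvBScan lines tl0 sec0 [] []).2.2.1,
       o0 ++ ((pvBScan lines tl0 sec0 [] []).2.2.2).filterMap pvFmtObj,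
       (pvBScan lines tl0 sec0 [] []).2.1,
       (f0 || tl0.isSome) || lines.any pvAnyHdr) := by
  intro lines
  induction lines with
  | nil => intro tl0 sec0 d0 o0 t0 f0; simp [pvALoop, pvBScan]
  | cons ln rest ih =>
    intro tl0 sec0 d0 o0 t0 f0
    by_cases h1 : pvIsHeaderB ln "title".toList = true
    · have hA : pvIsHeaderA ln "Title".toList = true := by rw [headerA_title]; exact h1
      simp only [pvALoop, pvBScan, hA, h1, if_true, List.any_cons]
      have key := ih (some ln) none d0 o0 t0 (f0 || tl0.isSome)
      rw [show pvTVal (some ln) t0 = pvExtractTitle ln from rfl] at key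
      simp only [Option.isSome_some, Bool.or_true] at key
      rw [key]
      have hy : pvAnyHdr ln = true := by simp only [pvAnyHdr]; rw [h1]; simp
      simp only [hy, Bool.true_or, Bool.or_true]
    · have hA : pvIsHeaderA ln "Title".toList = false := by
        rw [headerA_title]; simpa using h1
      by_cases h2 : pvIsHeaderB ln "description".toList = true
      · have hA2 : pvIsHeaderA ln "Description".toList = true := by rw [headerA_desc]; exact h2
        simp only [pvALoop, pvBScan, hA, h1, hA2, h2, if_true, Bool.false_eq_true, if_false,
          List.any_cons]
        have key := ih tl0 (some true) d0 o0 t0 true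
        simp only [Bool.true_or] at key
        rw [key]
        have hy : pvAnyHdr ln = true := by simp only [pvAnyHdr]; rw [h2]; simp
        simp only [hy, Bool.true_or, Bool.or_true]
      · have hA2 : pvIsHeaderA ln "Description".toList = false := by
          rw [headerA_desc]; simpa using h2
        by_cases h3 : pvIsHeaderB ln "objectives".toList = true
        · have hA3 : pvIsHeaderA ln "Objectives".toList = true := by rw [headerA_obj]; exact h3
          simp only [pvALoop, pvBScan, hA, h1, hA2, h2, hA3, h3, if_true, Bool.false_eq_true,
            if_false, List.any_cons]
          have key := ih tl0 (some false) d0 o0 t0 true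
          simp only [Bool.true_or] at key
          rw [key]
          have hy : pvAnyHdr ln = true := by simp only [pvAnyHdr]; rw [h3]; simp
          simp only [hy, Bool.true_or, Bool.or_true]
        · have hA3 : pvIsHeaderA ln "Objectives".toList = false := by
            rw [headerA_obj]; simpa using h3
          have hno : pvAnyHdr ln = false := by
            simp [pvAnyHdr]
            exact ⟨⟨by simpa using h1, by simpa using h2⟩, by simpa using h3⟩
          simp only [pvALoop, pvBScan, hA, h1, hA2, h2, hA3, h3, Bool.false_eq_true, if_false,
            List.any_cons, hno, Bool.false_or]
          rcases sec0 with _ | b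
          · dsimp only
            rw [ih tl0 none d0 o0 t0 f0]
          · cases b
            · -- objectives bucket
              dsimp only
              rw [bscan_acc rest tl0 (some false) [] ([] ++ [ln])]
              split_ifs with g1 g2 g3
              · rw [ih tl0 (some false) d0 (o0 ++ [PySem.Chars.strip
                    (PySem.List.slice (PySem.Chars.strip ln) (some 2) none)]) t0 f0]
                simp [pvFmtObj, g1]
              · rw [ih tl0 (some false) d0 (o0 ++ [PySem.Chars.strip
                    (PySem.List.slice (PySem.Chars.strip ln) (some 4) none)]) t0 f0]
                simp [pvFmtObj, g1, g2]
              · rw [ih tl0 (some false) d0 (o0 ++ [PySem.Chars.strip ln]) t0 f0]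
                simp [pvFmtObj, g1, g2, g3]
              · rw [ih tl0 (some false) d0 o0 t0 f0]
                simp [pvFmtObj, g1, g2, g3]
            · -- description bucket
              dsimp only
              rw [bscan_acc rest tl0 (some true) ([] ++ [ln]) []]
              rw [ih tl0 (some true) (d0 ++ [ln]) o0 t0 f0]
              simp

-- A's fallback rest_started=true tail copies everything
lemma afb_true : ∀ (lines : List (List Char)) t, pvAFallbackLoop lines t true = lines := by
  intro lines
  induction lines with
  | nil => intro t; rfl
  | cons ln rest ih => intro t; simp [pvAFallbackLoop, ih]

-- fallback correspondence
lemma fb_main : ∀ (lines : List (List Char)),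
    match lines.filter (fun ln => PySem.Chars.strip ln ≠ []) with
    | [] => pvBFallback lines = ([], lines) ∧ ∀ ln ∈ lines, PySem.Chars.strip ln = []
    | h :: _ => (pvBFallback lines).1 = PySem.Chars.strip h ∧
        (pvBFallback lines).2 = pvAFallbackLoop lines (PySem.Chars.strip h) false := by
  intro lines
  induction lines with
  | nil => exact ⟨by simp [pvBFallback], by simp⟩
  | cons ln rest ih =>
    by_cases hp : PySem.Chars.strip ln = []
    · have hd : (decide (PySem.Chars.strip ln ≠ [])) = false := by simp [hp]
      have hfilter : (ln :: rest).filter (fun ln => PySem.Chars.strip ln ≠ []) =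
          rest.filter (fun ln => PySem.Chars.strip ln ≠ []) := by
        simp [List.filter_cons, hp]
      rw [hfilter]
      rcases hrest : rest.filter (fun ln => PySem.Chars.strip ln ≠ []) with _ | ⟨h, t⟩ <;>
        rw [hrest] at ih
      · refine ⟨?_, ?_⟩
        · simp [pvBFallback, hp, ih.1]
        · intro x hx
          rcases List.mem_cons.mp hx with hx | hx
          · rw [hx]; exact hp
          · exact ih.2 x hx
      · have hh : PySem.Chars.strip h ≠ [] := by
          have hm : h ∈ rest.filter (fun ln => PySem.Chars.strip ln ≠ []) := by
            rw [hrest]; exact List.mem_cons_self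
          simpa using (List.of_mem_filter hm)
        refine ⟨?_, ?_⟩
        · simp [pvBFallback, hp, ih.1]
        · have hne : ¬ (PySem.Chars.strip ln == PySem.Chars.strip h) = true := by
            simp only [beq_iff_eq, hp]
            exact fun he => hh he.symm
          have hne2 : ¬ (([] : List Char) == PySem.Chars.strip h) = true := by
            simp only [beq_iff_eq]
            exact fun he => hh he.symm
          simp [pvBFallback, pvAFallbackLoop, hp, hne, hne2, hh, ih.2]
    · have hd : (decide (PySem.Chars.strip ln ≠ [])) = true := by simpa using hp
      have hfilter : (ln :: rest).filter (fun ln => PySem.Chars.strip ln ≠ []) =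
          ln :: rest.filter (fun ln => PySem.Chars.strip ln ≠ []) := by
        simp [List.filter_cons, hp]
      rw [hfilter]
      refine ⟨?_, ?_⟩
      · simp [pvBFallback, hp]
      · simp [pvBFallback, pvAFallbackLoop, hp, afb_true]


-- whitespace-only lines join and strip to nothing
lemma strip_join_ws (lines : List (List Char))
    (h : ∀ ln ∈ lines, PySem.Chars.strip ln = []) :
    PySem.Chars.strip (PySem.Chars.join ['\n'] lines) = [] := by
  have hsp : ∀ ln ∈ lines, ∀ c ∈ ln, PySem.Chars.isspace c = true := by
    intro ln hln c hc
    have hs := h ln hln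
    have hsplit := List.takeWhile_append_dropWhile (p := PySem.Chars.isspace) (l := ln)
    have h2 : List.dropWhile PySem.Chars.isspace
        ((List.dropWhile PySem.Chars.isspace ln).reverse) = [] := by
      simpa [PySem.Chars.strip, PySem.Chars.lstrip, PySem.Chars.rstrip] using hs
    have h3 := List.dropWhile_eq_nil_iff.mp h2
    rw [← hsplit] at hc
    rcases List.mem_append.mp hc with h4 | h4
    · exact List.mem_takeWhile_imp h4
    · exact h3 c (List.mem_reverse.mpr h4)
  have hall : ∀ c ∈ PySem.Chars.join ['\n'] lines, PySem.Chars.isspace c = true := by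
    clear h
    induction lines with
    | nil => simp [PySem.Chars.join_nil]
    | cons a t iht =>
      rcases t with _ | ⟨b, t'⟩
      · intro c hc
        rw [PySem.Chars.join_singleton] at hc
        exact hsp a (by simp) c hc
      · intro c hc
        rw [PySem.Chars.join_cons_cons] at hc
        rcases List.mem_append.mp hc with h4 | h4
        · rcases List.mem_append.mp h4 with h5 | h5
          · exact hsp a (by simp) c h5
          · have : c = '\n' := by simpa using h5
            rw [this]; decide
        · exact iht (fun ln hln => hsp ln (by simp [hln])) c h4
  have h1 : List.dropWhile PySem.Chars.isspace (PySem.Chars.join ['\n'] lines) = [] :=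
    List.dropWhile_eq_nil_iff.mpr hall
  simp [PySem.Chars.strip, PySem.Chars.lstrip, PySem.Chars.rstrip, h1]

-- boolean any distributes over || (searched, not found in Mathlib/PySem by name)
lemma any_orb (l : List (List Char)) (f g : List Char → Bool) :
    (l.any fun x => f x || g x) = (l.any f || l.any g) := by
  induction l with
  | nil => simp
  | cons a t ih => simp [ih, Bool.or_assoc, Bool.or_left_comm]

-- ===== VERDICT (by name: the statement is the Claim_ definition above) =====
theorem parse_quest_from_text_spec : Claim_equal_parse_quest_from_text := by
  intro text _dom
  unfold Spec_parse_quest_from_text parse_quest_from_text parse_quest_from_text_alt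
  have hloop := loop_eq (pvMkLines text) none none [] [] [] false
  rw [show pvTVal none ([] : List Char) = [] from rfl] at hloop
  simp only [Option.isSome_none, Bool.or_false, Bool.false_or, List.nil_append] at hloop
  dsimp only
  rw [hloop]
  dsimp only
  rcases hscan : pvBScan (pvMkLines text) none none [] [] with ⟨tl, sec', dr, orr⟩
  dsimp only
  have htl : tl.isSome = (pvMkLines text).any (fun l => pvIsHeaderB l "title".toList) := by
    have := bscan_tl (pvMkLines text) none none [] []
    rw [hscan] at this
    simpa using this
  have hfound : (pvMkLines text).any pvAnyHdr =
      (tl.isSome || (pvMkLines text).any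
        (fun l => pvIsHeaderB l "description".toList || pvIsHeaderB l "objectives".toList)) := by
    rw [htl, ← any_orb]
    congr 1
    funext l
    simp [pvAnyHdr, Bool.or_assoc]
  by_cases hf : ((pvMkLines text).any pvAnyHdr) = true
  · -- some header present: no fallback on either side
    rw [hf] at hfound
    rw [hf, ← hfound]
    simp only [reduceIte]
    cases tl <;> simp [pvTVal]
  · -- no header: fallback on both sides
    have hf' : ((pvMkLines text).any pvAnyHdr) = false := by simpa using hf
    rw [hf'] at hfound
    have hinert := bscan_inert (pvMkLines text) hf'
    rw [hscan] at hinert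
    obtain ⟨htl0, hsec0, hdr0, horr0⟩ : tl = none ∧ sec' = none ∧ dr = [] ∧ orr = [] := by
      constructor
      · exact congrArg Prod.fst hinert
      refine ⟨?_, ?_, ?_⟩
      · exact congrArg (fun p => p.2.1) hinert
      · exact congrArg (fun p => p.2.2.1) hinert
      · exact congrArg (fun p => p.2.2.2) hinert
    subst htl0 hsec0 hdr0 horr0
    rw [hf', ← hfound]
    simp only [reduceIte]
    have hfb := fb_main (pvMkLines text)
    rcases hfilter : (pvMkLines text).filter (fun ln => PySem.Chars.strip ln ≠ []) with _ | ⟨hd, tlr⟩ <;>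
      rw [hfilter] at hfb
    · -- no non-empty line: Untitled / empty description on both sides
      rw [hfb.1]
      have hws := strip_join_ws (pvMkLines text) hfb.2
      simp [PySem.Chars.join_nil, hws]
      decide
    · -- first non-empty line becomes the title on both sides
      have hb1 := hfb.1
      have hb2 := hfb.2
      rcases hB : pvBFallback (pvMkLines text) with ⟨bt, bd⟩
      rw [hB] at hb1 hb2
      dsimp only at hb1 hb2 ⊢
      rw [hb1, hb2]
      simp
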